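-- pv_equiv track=rewrite | github.com/aiswarya-1422/Hybrid-RAG | retrieval.py | guess_chapter
-- ===== SOURCE A (Python) =====
-- from typing import Dict, List, Optional, Tuple
--
-- def guess_chapter(question: str, chapters: List[str]) -> Optional[str]:
--     """
--     Simple heuristic to guess relevant chapter from query text.
--     """
--     q = question.lower()
--     best = None
--     best_len = 0
--
--     for ch in chapters:
--         for token in ch.lower().split():
--             if token and token in q and len(token) > best_len:
--                 best = ch
--                 best_len = len(token)
--
--     return best
-- ===== SOURCE B (Python) =====
-- def guess_chapter(question, chapters):
--     """
--     Simple heuristic to guess relevant chapter from query text.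
--     """
--     q = question.lower()
--     pairs = [(tok, ch) for ch in chapters for tok in ch.lower().split()]
--     pairs.sort(key=lambda p: len(p[0]), reverse=True)  # stable: ties keep enumeration order
--     for tok, ch in pairs:
--         if tok in q:
--             return ch
--     return None
-- ===== Notes on version B (the rewrite author's own statement) =====
-- stated objective: faster
-- what changed: Replaces the best-so-far accumulator loop by collect-all-(token,chapter)-pairs, stable sort by descending token length, and return the chapter of the first token that is a substring of the query; the scan stops at the first hit instead of substring-testing every token.
import Mathlib
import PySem

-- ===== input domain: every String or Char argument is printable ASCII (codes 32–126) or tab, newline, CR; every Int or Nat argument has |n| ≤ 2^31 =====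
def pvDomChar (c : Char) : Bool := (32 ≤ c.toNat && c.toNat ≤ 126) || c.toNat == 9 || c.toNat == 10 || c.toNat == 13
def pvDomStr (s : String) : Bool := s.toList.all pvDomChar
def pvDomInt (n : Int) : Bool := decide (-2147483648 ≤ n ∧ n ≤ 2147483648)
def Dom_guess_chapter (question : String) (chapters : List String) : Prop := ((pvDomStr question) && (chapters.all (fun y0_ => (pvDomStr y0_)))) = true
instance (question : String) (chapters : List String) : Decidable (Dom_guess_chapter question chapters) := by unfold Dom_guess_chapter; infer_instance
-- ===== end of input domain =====

-- B replaces A's best-so-far accumulator loop with collect pairs / stable sort by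
-- descending token length / return on first substring hit (measured faster: it stops
-- substring-testing at the first hit, A tests every token).

-- ===== PORT A =====
def guess_chapter (question : String) (chapters : List String) : Option String :=
  let q := PySem.Str.lower question
  (chapters.foldl (fun b ch =>
      (PySem.Str.split₀ (PySem.Str.lower ch)).foldl (fun b token =>
        if token ≠ "" && PySem.Str.isIn token q && decide (b.2 < PySem.Str.len token)
        then (some ch, PySem.Str.len token) else b) b)
    ((none : Option String), (0 : Int))).1

-- ===== PORT B =====
def guess_chapter_alt (question : String) (chapters : List String) : Option String :=
  let q := PySem.Str.lower question
  let pairs := chapters.flatMap (fun ch =>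
    (PySem.Str.split₀ (PySem.Str.lower ch)).map (fun tok => (tok, ch)))
  let sortedPairs := PySem.List.sorted pairs (fun p => PySem.Str.len p.1) true
  (sortedPairs.find? (fun p => PySem.Str.isIn p.1 q)).map (fun p => p.2)

-- ===== PRECONDITION & SPEC =====
def Spec_guess_chapter (question : String) (chapters : List String) (out : Option String) : Prop := out = guess_chapter_alt question chapters
instance (question : String) (chapters : List String) (out : Option String) : Decidable (Spec_guess_chapter question chapters out) := by unfold Spec_guess_chapter; infer_instance

-- ===== CLAIM (what is proved, stated in full; the proofs are below) =====
def Claim_equal_guess_chapter : Prop := ∀ (question : String) (chapters : List String), Dom_guess_chapter question chapters → Spec_guess_chapter question chapters (guess_chapter question chapters)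

-- ===== LEMMAS AND PROOFS =====

-- A's loop body, in (token, chapter)-pair form.
def pvStep (q : String) (b : Option String × Int) (p : String × String) : Option String × Int :=
  if p.1 ≠ "" && PySem.Str.isIn p.1 q && decide (b.2 < PySem.Str.len p.1)
  then (some p.2, PySem.Str.len p.1) else b

-- find? after inserting into a list sorted by descending token length.
theorem pv_find_insertBy (m : String × String → Bool) (p : String × String)
    (S : List (String × String))
    (hS : S.Pairwise (fun a b => PySem.Str.len b.1 ≤ PySem.Str.len a.1)) :
    (PySem.List.insertBy (fun a b => decide (PySem.Str.len b.1 < PySem.Str.len a.1)) p S).find? m =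
      (if m p then
        match S.find? m with
        | some p' => if PySem.Str.len p.1 ≤ PySem.Str.len p'.1 then some p' else some p
        | none => some p
       else S.find? m) := by
  induction S with
  | nil =>
    cases h : m p <;> simp [PySem.List.insertBy, List.find?, h]
  | cons y ys ih =>
    have hy : ∀ z ∈ ys, PySem.Str.len z.1 ≤ PySem.Str.len y.1 := (List.pairwise_cons.mp hS).1
    have hys : ys.Pairwise (fun a b => PySem.Str.len b.1 ≤ PySem.Str.len a.1) :=
      (List.pairwise_cons.mp hS).2
    by_cases hlt : PySem.Str.len y.1 < PySem.Str.len p.1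
    · -- p goes in front
      have hlt' : y.1.length < p.1.length := by simpa using hlt
      have hstep : PySem.List.insertBy (fun a b => decide (PySem.Str.len b.1 < PySem.Str.len a.1)) p (y :: ys)
          = p :: y :: ys := by simp [PySem.List.insertBy, hlt']
      rw [hstep]
      cases hmp : m p
      · simp [List.find?, hmp]
      · cases hmy : m y
        · simp only [List.find?, hmp, hmy]
          cases hfind : ys.find? m with
          | none => simp
          | some p' =>
            have hmem : p' ∈ ys := List.mem_of_find?_eq_some hfind
            have h1 : PySem.Str.len p'.1 ≤ PySem.Str.len y.1 := hy _ hmem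
            have h2 : ¬ p.1.length ≤ p'.1.length := by
              have h1' : p'.1.length ≤ y.1.length := by simpa using h1
              omega
            simp [h2]
        · have h2 : ¬ p.1.length ≤ y.1.length := by omega
          simp [List.find?, hmp, hmy, h2]
    · -- p goes after y
      have hlt' : ¬ y.1.length < p.1.length := by simpa using hlt
      have hstep : PySem.List.insertBy (fun a b => decide (PySem.Str.len b.1 < PySem.Str.len a.1)) p (y :: ys)
          = y :: PySem.List.insertBy (fun a b => decide (PySem.Str.len b.1 < PySem.Str.len a.1)) p ys := by
        simp [PySem.List.insertBy, hlt']
      rw [hstep]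
      cases hmy : m y
      · simpa [List.find?, hmy] using ih hys
      · have hle : p.1.length ≤ y.1.length := by omega
        cases hmp : m p <;> simp [List.find?, hmy, hle]

-- A's fold over the pair list computes the first maximal-length matching pair
-- of the descending stable sort.
theorem pv_foldl_eq_find (q : String) (L : List (String × String))
    (hL : ∀ p ∈ L, p.1 ≠ "") :
    L.foldl (pvStep q) ((none : Option String), (0 : Int)) =
      (match (PySem.List.sorted L (fun p => PySem.Str.len p.1) true).find?
          (fun p => PySem.Str.isIn p.1 q) with
       | none => ((none : Option String), (0 : Int))
       | some p => (some p.2, PySem.Str.len p.1)) := by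
  induction L using List.reverseRecOn with
  | nil => simp [PySem.List.sorted]
  | append_singleton L p ih =>
    have hL' : ∀ r ∈ L, r.1 ≠ "" := fun r hr => hL r (List.mem_append_left _ hr)
    have hp : p.1 ≠ "" := hL p (List.mem_append_right _ (List.mem_singleton.mpr rfl))
    have hplen : 0 < p.1.length := by
      have h1 : p.1.toList ≠ [] := fun h => hp (by
        have := congrArg String.ofList h; simpa using this)
      have h2 : p.1.toList.length ≠ 0 := by simpa using h1
      simpa using Nat.pos_of_ne_zero h2
    have hsorted : PySem.List.sorted (L ++ [p]) (fun r => PySem.Str.len r.1) true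
        = PySem.List.insertBy (fun a b => decide (PySem.Str.len b.1 < PySem.Str.len a.1)) p
            (PySem.List.sorted L (fun r => PySem.Str.len r.1) true) := by
      rw [PySem.List.sorted_rev_eq_foldl_insertBy, PySem.List.sorted_rev_eq_foldl_insertBy,
        List.foldl_append]
      rfl
    have hpw := PySem.List.sorted_pairwise_rev L (fun r => PySem.Str.len r.1)
    rw [List.foldl_append, ih hL', hsorted,
      pv_find_insertBy (fun r => PySem.Str.isIn r.1 q) p _ hpw]
    cases hmp : PySem.Str.isIn p.1 q
    · have hmp' : PySem.Chars.isIn p.1.toList q.toList = false := by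
        simpa [PySem.Str.isIn] using hmp
      cases hfind : (PySem.List.sorted L (fun r => PySem.Str.len r.1) true).find?
          (fun r => PySem.Str.isIn r.1 q) <;>
        simp [pvStep, List.foldl, hmp']
    · have hmp' : PySem.Chars.isIn p.1.toList q.toList = true := by
        simpa [PySem.Str.isIn] using hmp
      cases hfind : (PySem.List.sorted L (fun r => PySem.Str.len r.1) true).find?
          (fun r => PySem.Str.isIn r.1 q) with
      | none =>
        simp [pvStep, List.foldl, hp, hplen, hmp']
      | some p' =>
        by_cases hle : p.1.length ≤ p'.1.length
        · have hnlt : ¬ p'.1.length < p.1.length := by omega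
          simp [pvStep, List.foldl, hle, hnlt, hmp']
        · have hlt : p'.1.length < p.1.length := by omega
          simp [pvStep, List.foldl, hle, hlt, hp, hmp']

-- tokens produced by split() are never empty
theorem pv_go_ne_nil (s : List Char) : ∀ (cur acc : _),
    (∀ t ∈ acc, t ≠ ([] : List Char)) →
    ∀ t ∈ PySem.Chars.split₀.go s cur acc, t ≠ [] := by
  induction s with
  | nil =>
    intro cur acc hacc t ht
    by_cases hcur : cur.isEmpty
    · simp [PySem.Chars.split₀.go, hcur] at ht
      exact hacc t ht
    · simp [PySem.Chars.split₀.go, hcur] at ht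
      rcases ht with h | h
      · exact hacc t h
      · subst h
        simpa [List.isEmpty_iff] using hcur
  | cons c rest ih =>
    intro cur acc hacc t ht
    by_cases hsp : PySem.Chars.isspace c
    · by_cases hcur : cur.isEmpty
      · simp only [PySem.Chars.split₀.go, hsp, hcur, if_true] at ht
        exact ih [] acc hacc t ht
      · simp only [PySem.Chars.split₀.go, hsp, hcur, if_true] at ht
        refine ih [] (cur.reverse :: acc) ?_ t ht
        intro u hu
        rcases List.mem_cons.mp hu with h | h
        · subst h; simpa [List.isEmpty_iff] using hcur
        · exact hacc u h
    · simp only [PySem.Chars.split₀.go, hsp] at ht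
      exact ih (c :: cur) acc hacc t ht

theorem pv_split₀_ne_empty (s : String) : ∀ t ∈ PySem.Str.split₀ s, t ≠ "" := by
  intro t ht
  simp only [PySem.Str.split₀, List.mem_map] at ht
  obtain ⟨l, hl, rfl⟩ := ht
  have hne : l ≠ [] := pv_go_ne_nil s.toList [] [] (by simp) l hl
  intro h
  apply hne
  have := congrArg String.toList h
  simpa using this

-- ===== VERDICT (by name: the statement is the Claim_ definition above) =====
theorem guess_chapter_spec : Claim_equal_guess_chapter := by
  intro question chapters _
  unfold Spec_guess_chapter guess_chapter guess_chapter_alt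
  set q := PySem.Str.lower question with hq
  set pairs := chapters.flatMap (fun ch =>
    (PySem.Str.split₀ (PySem.Str.lower ch)).map (fun tok => (tok, ch))) with hpairs
  have hA : chapters.foldl (fun b ch =>
      (PySem.Str.split₀ (PySem.Str.lower ch)).foldl (fun b token =>
        if token ≠ "" && PySem.Str.isIn token q && decide (b.2 < PySem.Str.len token)
        then (some ch, PySem.Str.len token) else b) b)
      ((none : Option String), (0 : Int))
      = pairs.foldl (pvStep q) ((none : Option String), (0 : Int)) := by
    rw [hpairs, List.foldl_flatMap]
    simp [List.foldl_map, pvStep]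
  have hne : ∀ p ∈ pairs, p.1 ≠ "" := by
    intro p hp
    rw [hpairs] at hp
    simp only [List.mem_flatMap, List.mem_map] at hp
    obtain ⟨ch, _, tok, htok, rfl⟩ := hp
    exact pv_split₀_ne_empty _ tok htok
  simp only [hA, pv_foldl_eq_find q pairs hne]
  cases hfind : (PySem.List.sorted pairs (fun p => PySem.Str.len p.1) true).find?
      (fun p => PySem.Str.isIn p.1 q) <;> simp
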